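-- pv_equiv track=rewrite | github.com/rahuldebmohalder/FlowGuard | src/static_analysis/stg_builder.py | _normalize_state_value
-- ===== SOURCE A (Python) =====
-- from typing import Dict, List, Optional, Set, Tuple
--
-- def _normalize_state_value(
--     value: str, enum_name: Optional[str], states: List[str]
-- ) -> Optional[str]:
--     if value is None:
--         return None
--     # Handle EnumName.Value format
--     if "." in value:
--         value = value.split(".")[-1]
--     if value in states:
--         return value
--     # Case-insensitive fallback
--     lower_map = {s.lower(): s for s in states}
--     if value.lower() in lower_map:
--         return lower_map[value.lower()]
--     return None
-- ===== SOURCE B (Python) =====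
-- def _normalize_state_value(value, enum_name, states):
--     # Same result as A; single pass over states instead of membership test + dict build.
--     if value is None:
--         return None
--     if "." in value:
--         value = value.split(".")[-1]
--     vlow = value.lower()
--     fallback = None
--     for s in states:
--         if s == value:
--             return s
--         if s.lower() == vlow:
--             fallback = s  # last case-insensitive match wins, like the dict
--     return fallback
-- ===== Notes on version B (the rewrite author's own statement) =====
-- stated objective: simpler
-- what changed: Replaced the exact-membership test plus lowercase-dict construction and lookup with one loop over states that returns on an exact match and keeps the last case-insensitive match as a fallback.
import Mathlib
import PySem

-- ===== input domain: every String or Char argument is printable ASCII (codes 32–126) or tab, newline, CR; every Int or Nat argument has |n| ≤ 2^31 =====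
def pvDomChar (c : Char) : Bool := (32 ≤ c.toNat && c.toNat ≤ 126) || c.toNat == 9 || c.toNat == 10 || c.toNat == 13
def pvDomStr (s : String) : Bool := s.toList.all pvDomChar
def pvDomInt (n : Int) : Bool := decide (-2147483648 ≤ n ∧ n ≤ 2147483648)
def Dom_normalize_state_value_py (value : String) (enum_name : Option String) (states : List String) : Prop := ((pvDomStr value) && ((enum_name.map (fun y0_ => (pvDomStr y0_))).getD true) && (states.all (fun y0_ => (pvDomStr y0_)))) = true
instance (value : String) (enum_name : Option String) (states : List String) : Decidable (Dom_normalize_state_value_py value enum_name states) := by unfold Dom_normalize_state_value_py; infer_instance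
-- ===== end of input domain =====

-- B: one loop over `states` (exact match returns immediately, last case-insensitive match kept
-- as fallback) instead of A's membership test plus lowercase-dict build and lookup; same O(n) cost.

-- ===== PORT A =====
-- `value is None` cannot occur for a String argument; `value.split(".")[-1]` on a nonempty
-- split result is ported as getLast? with an unreachable default.
def normalize_state_value_py (value : String) (_enum_name : Option String) (states : List String) : Option String :=
  let value := if PySem.Str.isIn "." value
    then ((PySem.Str.split? value ".").getD []).getLast?.getD value
    else value
  if states.contains value then some value
  else
    let lower_map : PySem.Dict String String :=
      PySem.Dict.ofList (states.map (fun s => (PySem.Str.lower s, s)))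
    if lower_map.contains (PySem.Str.lower value) then lower_map.get? (PySem.Str.lower value)
    else none

-- ===== PORT B =====
def nsvLoop (value vlow : String) (fallback : Option String) : List String → Option String
  | [] => fallback
  | s :: rest =>
    if s == value then some s
    else nsvLoop value vlow (if PySem.Str.lower s == vlow then some s else fallback) rest

def normalize_state_value_py_alt (value : String) (_enum_name : Option String) (states : List String) : Option String :=
  let value := if PySem.Str.isIn "." value
    then ((PySem.Str.split? value ".").getD []).getLast?.getD value
    else value
  nsvLoop value (PySem.Str.lower value) none states

-- ===== PRECONDITION & SPEC =====
def Spec_normalize_state_value_py (value : String) (enum_name : Option String) (states : List String) (out : Option String) : Prop := out = normalize_state_value_py_alt value enum_name states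
instance (value : String) (enum_name : Option String) (states : List String) (out : Option String) : Decidable (Spec_normalize_state_value_py value enum_name states out) := by unfold Spec_normalize_state_value_py; infer_instance

-- ===== CLAIM (what is proved, stated in full; the proofs are below) =====
def Claim_equal_normalize_state_value_py : Prop := ∀ (value : String) (enum_name : Option String) (states : List String), Dom_normalize_state_value_py value enum_name states → Spec_normalize_state_value_py value enum_name states (normalize_state_value_py value enum_name states)

-- ===== LEMMAS AND PROOFS =====

-- B's loop returns `value` if it occurs in the list, else the LAST case-insensitive match, else the fallback.
theorem nsvLoop_eq_find (value vlow : String) (fb : Option String) (l : List String) :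
    nsvLoop value vlow fb l =
      if l.contains value then some value
      else (l.reverse.find? (fun s => PySem.Str.lower s == vlow)).or fb := by
  induction l generalizing fb with
  | nil => simp [nsvLoop]
  | cons s rest ih =>
    by_cases h : s = value
    · subst h; simp [nsvLoop]
    · have hb : (s == value) = false := by simp [h]
      have hb' : (value == s) = false := by simp [Ne.symm h]
      simp only [nsvLoop, hb, Bool.false_eq_true, if_false, ih, List.contains_cons, hb',
        Bool.false_or, List.reverse_cons, List.find?_append, Option.or_assoc]
      cases hp : (PySem.Str.lower s == vlow) <;> simp [List.find?, hp]

-- The lowercase dict built by A looks up to the LAST state whose lowercase equals the key.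
theorem get?_lower_dict (l : List String) (k : String) :
    (PySem.Dict.ofList (l.map (fun s => (PySem.Str.lower s, s)))).get? k =
      l.reverse.find? (fun s => PySem.Str.lower s == k) := by
  induction l using List.reverseRecOn with
  | nil => rfl
  | append_singleton l a ih =>
    have : PySem.Dict.ofList ((l ++ [a]).map (fun s => (PySem.Str.lower s, s))) =
        (PySem.Dict.ofList (l.map (fun s => (PySem.Str.lower s, s)))).insert (PySem.Str.lower a) a := by
      simp [PySem.Dict.ofList, PySem.Dict.update, List.foldl_append]
    rw [this, PySem.Dict.get?_insert, List.reverse_append]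
    by_cases h : k = PySem.Str.lower a
    · simp [h]
    · have : (PySem.Str.lower a == k) = false := by simp [Ne.symm h]
      simp [h, this, ih]

-- ===== VERDICT (by name: the statement is the Claim_ definition above) =====
theorem normalize_state_value_py_spec : Claim_equal_normalize_state_value_py := by
  intro value enum_name states _
  unfold Spec_normalize_state_value_py normalize_state_value_py normalize_state_value_py_alt
  set v := if PySem.Str.isIn "." value
    then ((PySem.Str.split? value ".").getD []).getLast?.getD value
    else value with hv
  rw [nsvLoop_eq_find]
  by_cases hm : v ∈ states
  · simp [hm]
  · simp only [PySem.Dict.contains_eq_isSome_get?, get?_lower_dict, Option.or_none]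
    cases hf : states.reverse.find? (fun s => PySem.Str.lower s == PySem.Str.lower v) <;> simp [hm]
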